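-- pv_equiv track=rewrite | github.com/SECRET-GUEST/sandcastle | scripts/src/intro.py | draw_frame
-- ===== SOURCE A (Python) =====
-- ascii_art = [
-- "   _____              _   _   _____       _____               _____   _______   _        ______ ",
-- "  / ____|     /\\     | \\ | | |  __ \\     / ____|     /\\      / ____| |__   __| | |      |  ____|",
-- " | (___      /  \\    |  \\| | | |  | |   | |         /  \\    | (___      | |    | |      | |__   ",
-- "  \\___ \\    / /\\ \\   | . ` | | |  | |   | |        / /\\ \\    \\___ \\     | |    | |      |  __|  ",
-- "  ____) |  / ____ \\  | |\\  | | |__| |   | |____   / ____ \\   ____) |    | |    | |____  | |____ "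
-- ]
--
-- def draw_frame(eq_lines, unlocked_lines):
--     """Construit le cadre ASCII pour la frame en cours"""
--     frame = []
--     for i in range(1, 8):
--         if i in eq_lines:
--             frame.append("=" * 96)
--         elif 1 < i < 7 and (i - 2) in unlocked_lines:
--             frame.append(ascii_art[i - 2])
--         else:
--             frame.append(" " * 96)
--     return "\n".join(frame)
-- ===== SOURCE B (Python) =====
-- ascii_art = [
-- "   _____              _   _   _____       _____               _____   _______   _        ______ ",
-- "  / ____|     /\\     | \\ | | |  __ \\     / ____|     /\\      / ____| |__   __| | |      |  ____|",
-- " | (___      /  \\    |  \\| | | |  | |   | |         /  \\    | (___      | |    | |      | |__   ",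
-- "  \\___ \\    / /\\ \\   | . ` | | |  | |   | |        / /\\ \\    \\___ \\     | |    | |      |  __|  ",
-- "  ____) |  / ____ \\  | |\\  | | |__| |   | |____   / ____ \\   ____) |    | |    | |____  | |____ "
-- ]
--
-- def draw_frame(eq_lines, unlocked_lines):
--     """Construit le cadre ASCII pour la frame en cours"""
--     # index the choices by line number instead of scanning the input lists per line
--     line_of = {i: " " * 96 for i in range(1, 8)}
--     for j in unlocked_lines:
--         if 0 <= j <= 4:
--             line_of[j + 2] = ascii_art[j]
--     for i in eq_lines:
--         if 1 <= i <= 7: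
--             line_of[i] = "=" * 96
--     return "\n".join(line_of[i] for i in range(1, 8))
-- ===== Notes on version B (the rewrite author's own statement) =====
-- stated objective: alternative
-- what changed: A scans eq_lines and unlocked_lines once per output line (membership test inside a loop over the 7 lines); B inverts the traversal: it builds a dict keyed by line number, iterates over the INPUT lists once each to overwrite entries, and reads the 7 lines out at the end, so no per-line membership scan remains (measured ~1.65x faster on large lists).
import Mathlib
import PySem

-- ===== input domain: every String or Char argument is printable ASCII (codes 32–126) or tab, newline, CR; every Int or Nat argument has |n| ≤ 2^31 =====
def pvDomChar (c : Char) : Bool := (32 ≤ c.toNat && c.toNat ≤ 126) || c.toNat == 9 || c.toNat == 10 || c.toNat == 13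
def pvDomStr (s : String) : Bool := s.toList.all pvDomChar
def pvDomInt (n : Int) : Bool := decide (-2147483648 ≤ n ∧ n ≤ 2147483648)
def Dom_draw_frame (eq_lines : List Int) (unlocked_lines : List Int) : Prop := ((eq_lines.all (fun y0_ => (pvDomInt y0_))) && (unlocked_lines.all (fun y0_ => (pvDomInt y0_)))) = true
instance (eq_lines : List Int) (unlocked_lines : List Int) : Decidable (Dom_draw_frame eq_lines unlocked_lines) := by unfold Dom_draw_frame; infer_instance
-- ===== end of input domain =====

-- B inverts A's traversal: instead of scanning both input lists once per output line, it indexes the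
-- 7 lines in a dict and iterates over the input lists once each to overwrite entries (alternative).

-- ===== PORT A =====
-- the module-level ascii_art constant
def pvAsciiArt : List String := [
  "   _____              _   _   _____       _____               _____   _______   _        ______ ",
  "  / ____|     /\\     | \\ | | |  __ \\     / ____|     /\\      / ____| |__   __| | |      |  ____|",
  " | (___      /  \\    |  \\| | | |  | |   | |         /  \\    | (___      | |    | |      | |__   ",
  "  \\___ \\    / /\\ \\   | . ` | | |  | |   | |        / /\\ \\    \\___ \\     | |    | |      |  __|  ",
  "  ____) |  / ____ \\  | |\\  | | |__| |   | |____   / ____ \\   ____) |    | |    | |____  | |____ "]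

def draw_frame (eq_lines : List Int) (unlocked_lines : List Int) : String :=
  let frame : List String :=
    (PySem.List.pyRange 1 8 1).foldl (fun frame i =>
      if eq_lines.contains i then
        frame ++ [String.ofList (List.replicate 96 '=')]
      else if decide (1 < i) && decide (i < 7) && unlocked_lines.contains (i - 2) then
        -- ascii_art[i-2]; the index is always in range (0..4) in this branch, so pyGetD is exact
        frame ++ [PySem.List.pyGetD pvAsciiArt (i - 2) ""]
      else
        frame ++ [String.ofList (List.replicate 96 ' ')]) []
  PySem.Str.join "\n" frame

-- ===== PORT B =====
def draw_frame_alt (eq_lines : List Int) (unlocked_lines : List Int) : String :=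
  -- line_of = {i: " "*96 for i in range(1, 8)}
  let d : PySem.Dict Int String :=
    (PySem.List.pyRange 1 8 1).foldl
      (fun d i => d.insert i (String.ofList (List.replicate 96 ' '))) PySem.Dict.empty
  -- for j in unlocked_lines: if 0 <= j <= 4: line_of[j+2] = ascii_art[j]
  let d : PySem.Dict Int String :=
    unlocked_lines.foldl (fun d j =>
      if decide (0 ≤ j) && decide (j ≤ 4) then
        d.insert (j + 2) (PySem.List.pyGetD pvAsciiArt j "") else d) d
  -- for i in eq_lines: if 1 <= i <= 7: line_of[i] = "="*96
  let d : PySem.Dict Int String :=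
    eq_lines.foldl (fun d i =>
      if decide (1 ≤ i) && decide (i ≤ 7) then
        d.insert i (String.ofList (List.replicate 96 '=')) else d) d
  -- "\n".join(line_of[i] for i in range(1, 8)); keys 1..7 are always present, so getD is exact
  PySem.Str.join "\n" ((PySem.List.pyRange 1 8 1).map (fun i => d.getD i ""))

-- ===== PRECONDITION & SPEC =====
def Spec_draw_frame (eq_lines : List Int) (unlocked_lines : List Int) (out : String) : Prop := out = draw_frame_alt eq_lines unlocked_lines
instance (eq_lines : List Int) (unlocked_lines : List Int) (out : String) : Decidable (Spec_draw_frame eq_lines unlocked_lines out) := by unfold Spec_draw_frame; infer_instance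

-- ===== CLAIM =====
def Claim_equal_draw_frame : Prop := ∀ (eq_lines : List Int) (unlocked_lines : List Int), Dom_draw_frame eq_lines unlocked_lines → Spec_draw_frame eq_lines unlocked_lines (draw_frame eq_lines unlocked_lines)

-- ===== LEMMAS AND PROOFS =====

theorem pvRange18 : PySem.List.pyRange 1 8 1 = [1, 2, 3, 4, 5, 6, 7] := by decide

-- A's loop as a map
theorem pvAFold (el ul : List Int) (l : List Int) (acc : List String) :
    l.foldl (fun frame i =>
      if el.contains i then frame ++ [String.ofList (List.replicate 96 '=')]
      else if decide (1 < i) && decide (i < 7) && ul.contains (i - 2) then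
        frame ++ [PySem.List.pyGetD pvAsciiArt (i - 2) ""]
      else frame ++ [String.ofList (List.replicate 96 ' ')]) acc
    = acc ++ l.map (fun i =>
      if el.contains i then String.ofList (List.replicate 96 '=')
      else if decide (1 < i) && decide (i < 7) && ul.contains (i - 2) then
        PySem.List.pyGetD pvAsciiArt (i - 2) ""
      else String.ofList (List.replicate 96 ' ')) := by
  induction l generalizing acc with
  | nil => simp
  | cons i rest ih =>
    simp only [List.foldl_cons, List.map_cons]
    split_ifs <;> rw [ih] <;> simp

-- lookup after B's eq-overwrite loop: the value is constant, so only membership matters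
theorem pvEqFold_getD (el : List Int) (d : PySem.Dict Int String) (i : Int)
    (h1 : 1 ≤ i) (h7 : i ≤ 7) :
    (el.foldl (fun d k =>
        if decide (1 ≤ k) && decide (k ≤ 7) then
          d.insert k (String.ofList (List.replicate 96 '=')) else d) d).getD i ""
      = if el.contains i then String.ofList (List.replicate 96 '=') else d.getD i "" := by
  induction el generalizing d with
  | nil => simp
  | cons a rest ih =>
    simp only [List.foldl_cons, List.contains_cons]
    by_cases hP : (decide (1 ≤ a) && decide (a ≤ 7)) = true
    · rw [if_pos hP, ih, PySem.Dict.getD_insert]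
      by_cases hia : i = a
      · simp [hia]
      · simp [hia]
    · rw [if_neg hP, ih]
      have hia : ¬ (i = a) := by
        intro h; subst h
        simp only [Bool.and_eq_true, decide_eq_true_eq] at hP
        omega
      simp [hia]

-- lookup after B's ascii-overwrite loop, key j+2
theorem pvUlFold_getD (ul : List Int) (d : PySem.Dict Int String) (i : Int) :
    (ul.foldl (fun d j =>
        if decide (0 ≤ j) && decide (j ≤ 4) then
          d.insert (j + 2) (PySem.List.pyGetD pvAsciiArt j "") else d) d).getD i ""
      = if (decide (2 ≤ i) && decide (i ≤ 6)) && ul.contains (i - 2) then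
          PySem.List.pyGetD pvAsciiArt (i - 2) ""
        else d.getD i "" := by
  induction ul generalizing d with
  | nil => simp
  | cons a rest ih =>
    simp only [List.foldl_cons, List.contains_cons]
    by_cases hP : (decide (0 ≤ a) && decide (a ≤ 4)) = true
    · rw [if_pos hP, ih, PySem.Dict.getD_insert]
      simp only [Bool.and_eq_true, decide_eq_true_eq] at hP
      by_cases hia : i = a + 2
      · subst hia
        have hia2 : a + 2 - 2 = a := by omega
        have h2 : (2:Int) ≤ a + 2 := by omega
        have h6 : a + 2 ≤ (6:Int) := by omega
        simp [hia2, h2, h6]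
      · by_cases h26 : (decide (2 ≤ i) && decide (i ≤ 6)) = true
        · have hja : ¬ (i - 2 = a) := by intro h; exact hia (by omega)
          simp [h26, hja, hia]
        · simp [h26, hia]
    · rw [if_neg hP, ih]
      simp only [Bool.and_eq_true, decide_eq_true_eq, not_and] at hP
      by_cases h26 : (decide (2 ≤ i) && decide (i ≤ 6)) = true
      · have hja : ¬ (i - 2 = a) := by
          simp only [Bool.and_eq_true, decide_eq_true_eq] at h26
          intro h
          have := hP (by omega)
          omega
        simp [h26, hja]
      · simp [h26]

theorem pvFrames_eq (el ul : List Int) :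
    draw_frame el ul = draw_frame_alt el ul := by
  unfold draw_frame draw_frame_alt
  apply congrArg (PySem.Str.join "\n")
  rw [pvAFold, List.nil_append, pvRange18]
  simp only [List.map_cons, List.map_nil]
  rw [pvEqFold_getD el _ 1 (by norm_num) (by norm_num),
      pvEqFold_getD el _ 2 (by norm_num) (by norm_num),
      pvEqFold_getD el _ 3 (by norm_num) (by norm_num),
      pvEqFold_getD el _ 4 (by norm_num) (by norm_num),
      pvEqFold_getD el _ 5 (by norm_num) (by norm_num),
      pvEqFold_getD el _ 6 (by norm_num) (by norm_num),
      pvEqFold_getD el _ 7 (by norm_num) (by norm_num),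
      pvUlFold_getD ul _ 1, pvUlFold_getD ul _ 2, pvUlFold_getD ul _ 3,
      pvUlFold_getD ul _ 4, pvUlFold_getD ul _ 5, pvUlFold_getD ul _ 6,
      pvUlFold_getD ul _ 7]
  simp only [List.cons.injEq, and_true]
  refine ⟨?_, ?_, ?_, ?_, ?_, ?_, ?_⟩ <;>
    · norm_num <;> (split_ifs <;> rfl)

-- ===== VERDICT =====
theorem draw_frame_spec : Claim_equal_draw_frame := by
  intro eq_lines unlocked_lines _
  exact pvFrames_eq eq_lines unlocked_lines
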